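-- pv_equiv track=rewrite | github.com/MDx-Vision/fcra | scripts/generate_all_tests.py | categorize_routes
-- ===== SOURCE A (Python) =====
-- def categorize_routes(routes):
--     """Group routes by feature area"""
--     categories = {
--         'dashboard': [],
--         'clients': [],
--         'staff': [],
--         'analysis': [],
--         'letters': [],
--         'settlements': [],
--         'cases': [],
--         'api': [],
--         'auth': [],
--         'automation': [],
--         'reports': [],
--         'other': []
--     }
--
--     for route in routes:
--         path = route['path'].lower()
--         if '/dashboard' in path:
--             if 'client' in path:
--                 categories['clients'].append(route)
--             elif 'staff' in path:
--                 categories['staff'].append(route)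
--             elif 'settlement' in path:
--                 categories['settlements'].append(route)
--             elif 'case' in path:
--                 categories['cases'].append(route)
--             elif 'letter' in path or 'automation' in path:
--                 categories['automation'].append(route)
--             elif 'analytic' in path:
--                 categories['dashboard'].append(route)
--             else:
--                 categories['dashboard'].append(route)
--         elif '/api/' in path:
--             categories['api'].append(route)
--         elif '/staff' in path or '/login' in path:
--             categories['auth'].append(route)
--         elif '/analysis' in path:
--             categories['analysis'].append(route)
--         else:
--             categories['other'].append(route)
--
--     return categories
-- ===== SOURCE B (Python) =====
-- _CATEGORIES = ['dashboard', 'clients', 'staff', 'analysis', 'letters',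
--                'settlements', 'cases', 'api', 'auth', 'automation',
--                'reports', 'other']
--
-- _RULES = [
--     (lambda p: '/dashboard' in p and 'client' in p, 'clients'),
--     (lambda p: '/dashboard' in p and 'staff' in p, 'staff'),
--     (lambda p: '/dashboard' in p and 'settlement' in p, 'settlements'),
--     (lambda p: '/dashboard' in p and 'case' in p, 'cases'),
--     (lambda p: '/dashboard' in p and ('letter' in p or 'automation' in p), 'automation'),
--     (lambda p: '/dashboard' in p, 'dashboard'),
--     (lambda p: '/api/' in p, 'api'),
--     (lambda p: '/staff' in p or '/login' in p, 'auth'),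
--     (lambda p: '/analysis' in p, 'analysis'),
--     (lambda p: True, 'other'),
-- ]
--
--
-- def _category(path):
--     for pred, cat in _RULES:
--         if pred(path):
--             return cat
--
--
-- def categorize_routes(routes):
--     """Group routes by feature area"""
--     return {c: [r for r in routes if _category(r['path'].lower()) == c]
--             for c in _CATEGORIES}
-- ===== Notes on version B (the rewrite author's own statement) =====
-- stated objective: idiomatic
-- what changed: Replaces the single-pass loop that appends into a pre-built mutable dict of buckets with a data-driven ordered rule table (predicate, category) plus a dict comprehension that builds each bucket by filtering the routes per category.
import Mathlib
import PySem

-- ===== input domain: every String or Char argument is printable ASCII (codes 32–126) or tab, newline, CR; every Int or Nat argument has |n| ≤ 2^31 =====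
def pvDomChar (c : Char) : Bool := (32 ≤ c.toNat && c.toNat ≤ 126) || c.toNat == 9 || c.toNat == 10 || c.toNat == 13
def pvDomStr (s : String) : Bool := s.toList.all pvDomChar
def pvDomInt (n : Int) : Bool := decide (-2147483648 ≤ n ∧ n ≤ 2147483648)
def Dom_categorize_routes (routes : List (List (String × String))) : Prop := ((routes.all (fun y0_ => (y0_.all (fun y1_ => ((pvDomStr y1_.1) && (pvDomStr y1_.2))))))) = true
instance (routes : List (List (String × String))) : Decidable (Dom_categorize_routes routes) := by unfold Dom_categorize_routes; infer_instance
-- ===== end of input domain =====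

-- B replaces A's single-pass append-into-mutable-dict loop with an ordered rule table and a
-- per-category filter comprehension (idiomatic restructuring; same asymptotic cost).

-- ===== PORT A =====
-- A's loop body: pick the category and append the route to that bucket (branches in A's order)
def pvStepA (cats : PySem.Dict String (List (List (String × String))))
    (route : List (String × String)) : PySem.Dict String (List (List (String × String))) :=
  let path := PySem.Str.lower (((PySem.Dict.mk route).get? "path").getD "")
  if PySem.Str.isIn "/dashboard" path then
    if PySem.Str.isIn "client" path then cats.modify "clients" [] (· ++ [route])
    else if PySem.Str.isIn "staff" path then cats.modify "staff" [] (· ++ [route])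
    else if PySem.Str.isIn "settlement" path then cats.modify "settlements" [] (· ++ [route])
    else if PySem.Str.isIn "case" path then cats.modify "cases" [] (· ++ [route])
    else if PySem.Str.isIn "letter" path || PySem.Str.isIn "automation" path then
      cats.modify "automation" [] (· ++ [route])
    else if PySem.Str.isIn "analytic" path then cats.modify "dashboard" [] (· ++ [route])
    else cats.modify "dashboard" [] (· ++ [route])
  else if PySem.Str.isIn "/api/" path then cats.modify "api" [] (· ++ [route])
  else if PySem.Str.isIn "/staff" path || PySem.Str.isIn "/login" path then
    cats.modify "auth" [] (· ++ [route])
  else if PySem.Str.isIn "/analysis" path then cats.modify "analysis" [] (· ++ [route])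
  else cats.modify "other" [] (· ++ [route])

def categorize_routes (routes : List (List (String × String))) :
    List (String × List (List (String × String))) :=
  let categories : PySem.Dict String (List (List (String × String))) :=
    (((((((((((PySem.Dict.empty.insert "dashboard" []).insert "clients" []).insert "staff" []).insert
      "analysis" []).insert "letters" []).insert "settlements" []).insert "cases" []).insert
      "api" []).insert "auth" []).insert "automation" []).insert "reports" []).insert "other" []
  (routes.foldl pvStepA categories).items

-- ===== PORT B =====
def pvCategories : List String :=
  ["dashboard", "clients", "staff", "analysis", "letters", "settlements", "cases", "api",
   "auth", "automation", "reports", "other"]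

def pvRules : List ((String → Bool) × String) :=
  [(fun p => PySem.Str.isIn "/dashboard" p && PySem.Str.isIn "client" p, "clients"),
   (fun p => PySem.Str.isIn "/dashboard" p && PySem.Str.isIn "staff" p, "staff"),
   (fun p => PySem.Str.isIn "/dashboard" p && PySem.Str.isIn "settlement" p, "settlements"),
   (fun p => PySem.Str.isIn "/dashboard" p && PySem.Str.isIn "case" p, "cases"),
   (fun p => PySem.Str.isIn "/dashboard" p &&
       (PySem.Str.isIn "letter" p || PySem.Str.isIn "automation" p), "automation"),
   (fun p => PySem.Str.isIn "/dashboard" p, "dashboard"),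
   (fun p => PySem.Str.isIn "/api/" p, "api"),
   (fun p => PySem.Str.isIn "/staff" p || PySem.Str.isIn "/login" p, "auth"),
   (fun p => PySem.Str.isIn "/analysis" p, "analysis"),
   (fun _ => true, "other")]

-- _category: scan the rule list, return the first matching category
def pvCategory (path : String) : List ((String → Bool) × String) → String
  | [] => ""           -- unreachable: the last rule always matches
  | (pred, cat) :: rest => if pred path then cat else pvCategory path rest

def categorize_routes_alt (routes : List (List (String × String))) :
    List (String × List (List (String × String))) :=
  pvCategories.map (fun c =>
    (c, routes.filter (fun r =>
      pvCategory (PySem.Str.lower (((PySem.Dict.mk r).get? "path").getD "")) pvRules == c)))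

-- ===== PRECONDITION & SPEC =====
-- Pre_ excludes routes without a 'path' key, on which A raises KeyError.
def Pre_categorize_routes (routes : List (List (String × String))) : Prop :=
  routes.all (fun r => (PySem.Dict.mk r).contains "path") = true
instance (routes : List (List (String × String))) : Decidable (Pre_categorize_routes routes) := by
  unfold Pre_categorize_routes; infer_instance

def pvWitness_categorize_routes : (List (List (String × String))) :=
  [[("path", "/dashboard/clients")], [("path", "/api/v1"), ("method", "GET")]]

def Spec_categorize_routes (routes : List (List (String × String)))
    (out : List (String × List (List (String × String)))) : Prop :=
  out = categorize_routes_alt routes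
instance (routes : List (List (String × String))) (out : List (String × List (List (String × String)))) : Decidable (Spec_categorize_routes routes out) := by unfold Spec_categorize_routes; infer_instance

-- ===== CLAIM (what is proved, stated in full; the proofs are below) =====
def Claim_equal_categorize_routes : Prop := ∀ (routes : List (List (String × String))), Dom_categorize_routes routes → Pre_categorize_routes routes → Spec_categorize_routes routes (categorize_routes routes)

-- ===== LEMMAS AND PROOFS =====

-- the key A's branch tree selects for a route
def pvKeyA (route : List (String × String)) : String :=
  let path := PySem.Str.lower (((PySem.Dict.mk route).get? "path").getD "")
  if PySem.Str.isIn "/dashboard" path then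
    if PySem.Str.isIn "client" path then "clients"
    else if PySem.Str.isIn "staff" path then "staff"
    else if PySem.Str.isIn "settlement" path then "settlements"
    else if PySem.Str.isIn "case" path then "cases"
    else if PySem.Str.isIn "letter" path || PySem.Str.isIn "automation" path then "automation"
    else if PySem.Str.isIn "analytic" path then "dashboard"
    else "dashboard"
  else if PySem.Str.isIn "/api/" path then "api"
  else if PySem.Str.isIn "/staff" path || PySem.Str.isIn "/login" path then "auth"
  else if PySem.Str.isIn "/analysis" path then "analysis"
  else "other"

lemma pvStepA_eq (cats : PySem.Dict String (List (List (String × String))))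
    (route : List (String × String)) :
    pvStepA cats route = cats.modify (pvKeyA route) [] (· ++ [route]) := by
  unfold pvStepA pvKeyA
  dsimp only
  split_ifs <;> rfl

lemma pvKeyA_eq_category (route : List (String × String)) :
    pvKeyA route =
      pvCategory (PySem.Str.lower (((PySem.Dict.mk route).get? "path").getD "")) pvRules := by
  unfold pvKeyA pvRules
  simp only [pvCategory]
  split_ifs <;> simp_all

lemma pvKeyA_mem (route : List (String × String)) : pvKeyA route ∈ pvCategories := by
  unfold pvKeyA pvCategories
  dsimp only
  split_ifs <;> simp

set_option maxHeartbeats 1000000 in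
theorem categorize_routes_spec : Claim_equal_categorize_routes := by
  intro routes _ _
  unfold Spec_categorize_routes categorize_routes categorize_routes_alt
  have hstep : pvStepA = fun cats route => cats.modify (pvKeyA route) [] (· ++ [route]) := by
    funext c r; exact pvStepA_eq c r
  rw [hstep]
  set d0 : PySem.Dict String (List (List (String × String))) :=
    (((((((((((PySem.Dict.empty.insert "dashboard" []).insert "clients" []).insert "staff" []).insert
      "analysis" []).insert "letters" []).insert "settlements" []).insert "cases" []).insert
      "api" []).insert "auth" []).insert "automation" []).insert "reports" []).insert "other" []
    with hd0
  have hkeys0 : d0.keys = pvCategories := by rw [hd0]; decide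
  have hnd0 : d0.keys.Nodup := by rw [hkeys0]; decide
  set final := routes.foldl (fun cats route => cats.modify (pvKeyA route) [] (· ++ [route])) d0
    with hfinal
  have hkeys : final.keys = pvCategories := by
    rw [hfinal, PySem.Dict.keys_foldl_modify_key, hkeys0,
        PySem.Set.update_eq_append_filter]
    have : (PySem.Set.ofList (routes.map pvKeyA)).filter
        (fun y => !(PySem.Set.contains pvCategories y)) = [] := by
      rw [List.filter_eq_nil_iff]
      intro y hy
      have hy' : y ∈ routes.map pvKeyA := (PySem.Set.mem_ofList _ _).1 hy
      obtain ⟨r, _, rfl⟩ := List.mem_map.1 hy'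
      simp [pvKeyA_mem r]
    simp only [this, List.append_nil]
  have hnd : final.keys.Nodup := by rw [hkeys]; decide
  have hitems : final.items = final.keys.map (fun k => (k, final.getD k [])) :=
    PySem.Dict.items_eq_map_keys final hnd []
  rw [hitems, hkeys]
  apply List.map_congr_left
  intro c hc
  have hgetD : final.getD c [] = (routes.filter (fun r => pvKeyA r == c)) := by
    have hfold : routes.foldl (fun cats route => cats.modify (pvKeyA route) [] (· ++ [route])) d0
        = (routes.map (fun r => (pvKeyA r, r))).foldl
            (fun d p => d.modify p.1 [] (· ++ [p.2])) d0 := by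
      rw [List.foldl_map]
    have happ := PySem.Dict.getD_foldl_modify_append
      (l := routes.map (fun r => (pvKeyA r, r))) (d := d0) (c := c)
    rw [hfinal, hfold, happ]
    have hd0c : d0.getD c [] = [] := by
      fin_cases hc <;> (rw [hd0]; decide)
    rw [hd0c, List.filter_map, List.map_map]
    simp [Function.comp_def]
  rw [hgetD]
  congr 1
  apply List.filter_congr
  intro r _
  rw [pvKeyA_eq_category]
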